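-- pv_equiv track=rewrite | github.com/mm3509/b9122 | 3-assignments/assignment-4/solution_3_triple_sum.py | generate_pair_sums
-- ===== SOURCE A (Python) =====
-- def generate_pair_sums(alist):
--
--     # Student: this function is refactored to help the other function stay
--     # near 20 lines.
--
--     alist = sorted(alist)
--     n = len(alist)
--     pair_sums = {}
--
--     for second_index in range(n):
--         for third_index in range(second_index + 1, n):
--             pair_sum = alist[second_index] + alist[third_index]
--             doublet = [(second_index, third_index)]
--             pair_sums[pair_sum] = pair_sums.get(pair_sum, []) + doublet
--
--     return pair_sums
-- ===== SOURCE B (Python) =====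
-- def generate_pair_sums(alist):
--     # Enumerate all pairs once, then group pairs by their sum: distinct sums in
--     # first-occurrence order, value = pairs with that sum in enumeration order.
--     alist = sorted(alist)
--     n = len(alist)
--     pairs = [(i, j) for i in range(n) for j in range(i + 1, n)]
--     sums = [alist[i] + alist[j] for i, j in pairs]
--     keys = list(dict.fromkeys(sums))
--     return {s: [p for p, t in zip(pairs, sums) if t == s] for s in keys}
-- ===== Notes on version B (the rewrite author's own statement) =====
-- stated objective: alternative
-- what changed: Instead of accumulating a dict entry pair-by-pair inside nested loops, B enumerates all index pairs and their sums as flat lists first, dedupes the sums in first-occurrence order, and builds the result with one filtering comprehension per distinct sum.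
import Mathlib
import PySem

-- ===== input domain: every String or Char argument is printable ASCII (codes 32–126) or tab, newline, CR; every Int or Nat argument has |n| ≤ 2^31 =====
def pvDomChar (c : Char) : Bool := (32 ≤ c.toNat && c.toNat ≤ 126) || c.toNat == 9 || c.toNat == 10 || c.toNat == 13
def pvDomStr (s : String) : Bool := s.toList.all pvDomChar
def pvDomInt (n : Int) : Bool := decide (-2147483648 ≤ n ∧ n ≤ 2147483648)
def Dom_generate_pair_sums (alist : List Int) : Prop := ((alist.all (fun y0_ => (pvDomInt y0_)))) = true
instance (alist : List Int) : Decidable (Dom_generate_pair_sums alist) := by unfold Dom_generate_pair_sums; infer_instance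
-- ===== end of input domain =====

-- B groups all pairs by their sum in one enumerate/dedup/filter pass instead of A's
-- incremental per-pair dict accumulation; objective: alternative decomposition, not faster.

-- ===== PORT A =====
def generate_pair_sums (alist : List Int) : List (Int × List (Int × Int)) :=
  let a := PySem.List.sorted alist id
  let n : Int := PySem.List.len a
  let d := (PySem.List.pyRange 0 n 1).foldl (fun d second_index =>
    (PySem.List.pyRange (second_index + 1) n 1).foldl (fun d third_index =>
      -- indices come from range(n) so they are always in range: pyGetD is exact here
      let pair_sum := PySem.List.pyGetD a second_index 0 + PySem.List.pyGetD a third_index 0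
      let doublet := [(second_index, third_index)]
      d.insert pair_sum (d.getD pair_sum [] ++ doublet)) d) PySem.Dict.empty
  d.items

-- ===== PORT B =====
def generate_pair_sums_alt (alist : List Int) : List (Int × List (Int × Int)) :=
  let a := PySem.List.sorted alist id
  let n : Int := PySem.List.len a
  let pairs := (PySem.List.pyRange 0 n 1).flatMap (fun i =>
    (PySem.List.pyRange (i + 1) n 1).map (fun j => (i, j)))
  let sums := pairs.map (fun p => PySem.List.pyGetD a p.1 0 + PySem.List.pyGetD a p.2 0)
  let keys := PySem.List.dedup sums
  keys.map (fun s => (s, ((pairs.zip sums).filter (fun q => q.2 == s)).map (·.1)))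

-- ===== PRECONDITION & SPEC =====
def Spec_generate_pair_sums (alist : List Int) (out : List (Int × List (Int × Int))) : Prop := out = generate_pair_sums_alt alist
instance (alist : List Int) (out : List (Int × List (Int × Int))) : Decidable (Spec_generate_pair_sums alist out) := by unfold Spec_generate_pair_sums; infer_instance

-- ===== CLAIM (what is proved, stated in full; the proofs are below) =====
def Claim_equal_generate_pair_sums : Prop := ∀ (alist : List Int), Dom_generate_pair_sums alist → Spec_generate_pair_sums alist (generate_pair_sums alist)

-- ===== LEMMAS AND PROOFS =====

theorem foldl_flatMap_eq {α β γ : Type} (l : List α) (f : α → List β) (g : γ → β → γ) (init : γ) :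
    (l.flatMap f).foldl g init = l.foldl (fun acc x => (f x).foldl g acc) init := by
  induction l generalizing init with
  | nil => rfl
  | cons x xs ih => simp [List.flatMap_cons, List.foldl_append, ih]

theorem zip_map_self {α β : Type} (l : List α) (f : α → β) :
    l.zip (l.map f) = l.map (fun x => (x, f x)) := by
  induction l with
  | nil => rfl
  | cons x xs ih => simp [ih]

theorem generate_pair_sums_eq_alt (alist : List Int) :
    generate_pair_sums alist = generate_pair_sums_alt alist := by
  unfold generate_pair_sums generate_pair_sums_alt
  set a := PySem.List.sorted alist id with ha
  set n : Int := PySem.List.len a with hn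
  set key : Int × Int → Int :=
    fun p => PySem.List.pyGetD a p.1 0 + PySem.List.pyGetD a p.2 0 with hkey
  set pairs := (PySem.List.pyRange 0 n 1).flatMap (fun i =>
    (PySem.List.pyRange (i + 1) n 1).map (fun j => (i, j))) with hpairs
  -- A's nested loop is the flat loop over `pairs`, each step a `modify`
  have hflat : ((PySem.List.pyRange 0 n 1).foldl (fun d second_index =>
      (PySem.List.pyRange (second_index + 1) n 1).foldl (fun d third_index =>
        d.insert (PySem.List.pyGetD a second_index 0 + PySem.List.pyGetD a third_index 0)
          (d.getD (PySem.List.pyGetD a second_index 0 + PySem.List.pyGetD a third_index 0) []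
            ++ [(second_index, third_index)])) d) PySem.Dict.empty)
      = pairs.foldl (fun d p => d.modify (key p) [] (· ++ [p])) PySem.Dict.empty := by
    rw [hpairs, foldl_flatMap_eq]
    simp only [List.foldl_map]
    rfl
  simp only []
  rw [hflat]
  set d := pairs.foldl (fun d p => d.modify (key p) [] (· ++ [p])) PySem.Dict.empty with hd
  have hnodup : d.keys.Nodup := by
    rw [hd]
    exact PySem.Dict.nodup_keys_foldl_modify_key pairs key [] (fun _ p => (· ++ [p])) _
      (by simp [PySem.Dict.keys_empty])
  have hkeys : d.keys = PySem.List.dedup (pairs.map key) := by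
    rw [hd, PySem.Dict.keys_foldl_modify_key pairs key [] (fun _ p => (· ++ [p])),
      PySem.List.dedup_eq_ofList]
    rfl
  have hgetD : ∀ s : Int, d.getD s [] = pairs.filter (fun p => key p == s) := by
    intro s
    have : d = (pairs.map (fun p => (key p, p))).foldl
        (fun d q => d.modify q.1 [] (· ++ [q.2])) PySem.Dict.empty := by
      rw [hd, List.foldl_map]
    rw [this, PySem.Dict.getD_foldl_modify_append, PySem.Dict.getD_empty, List.filter_map]
    simp [Function.comp_def]
  rw [PySem.Dict.items_eq_map_keys d hnodup [], hkeys]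
  apply List.map_congr_left
  intro s _
  rw [hgetD s, zip_map_self, List.filter_map, List.map_map]
  simp only [Function.comp_def, List.map_id']
  rfl

-- ===== VERDICT (by name: the statement is the Claim_ definition above) =====
theorem generate_pair_sums_spec : Claim_equal_generate_pair_sums := by
  intro alist _
  unfold Spec_generate_pair_sums
  exact generate_pair_sums_eq_alt alist
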